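-- pv_equiv track=rewrite | github.com/MrBrantCode/unitest_baseline | mut_generate/mist_train_taco/taco_17116/solution.py | count_ways_to_force_loss
-- ===== SOURCE A (Python) =====
-- import operator as op
-- import functools as ft
--
-- MOD = 1000000007
--
-- def count_ways_to_force_loss(piles):
--     def numunrestrictedsolns(piles, MOD=MOD):
--         if len(piles) == 0:
--             return 1
--         xorall = ft.reduce(op.xor, piles)
--         leftmost = ft.reduce(op.or_, piles).bit_length() - 1
--         rightmost = max(0, xorall.bit_length() - 1)
--         ans = 0
--         for first1 in range(rightmost, leftmost + 1):
--             premult = 1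
--             matchbit = 1 << first1
--             for (i, bigalt) in enumerate(piles):
--                 if bigalt & matchbit != 0:
--                     even = 1
--                     odd = 0
--                     for pile in piles[i + 1:]:
--                         neweven = (1 + (pile & ~-matchbit)) * even
--                         newodd = (1 + (pile & ~-matchbit)) * odd
--                         if pile & matchbit != 0:
--                             neweven += matchbit * odd
--                             newodd += matchbit * even
--                         (even, odd) = (neweven % MOD, newodd % MOD)
--                     ans += (even if xorall & matchbit != 0 else odd) * premult % MOD
--                 premult = premult * ((bigalt & ~-matchbit) + 1) % MOD
--         if xorall == 0:
--             ans += 1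
--         return ans % MOD
--
--     return (numunrestrictedsolns(piles) - numunrestrictedsolns([pile - 1 for pile in piles if pile > 1])) % MOD
-- ===== SOURCE B (Python) =====
-- import operator as op
-- import functools as ft
--
-- MOD = 1000000007
--
-- def count_ways_to_force_loss(piles):
--     def f(ps):
--         if not ps:
--             return 1
--         xorall = ft.reduce(op.xor, ps)
--         orall = ft.reduce(op.or_, ps)
--         leftmost = orall.bit_length() - 1
--         rightmost = max(0, xorall.bit_length() - 1)
--         n = len(ps)
--         ans = 0
--         for first1 in range(rightmost, leftmost + 1):
--             matchbit = 1 << first1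
--             mask = matchbit - 1
--             # one backward pass: suf[i] = (x, y) such that the suffix DP over
--             # ps[i:] starting from (even, odd) = (1, 0) ends at (x, y)
--             suf = [(1, 0)] * (n + 1)
--             x, y = 1, 0
--             for i in range(n - 1, -1, -1):
--                 p = ps[i]
--                 a = 1 + (p & mask)
--                 b = matchbit if p & matchbit else 0
--                 x, y = (x * a + y * b) % MOD, (x * b + y * a) % MOD
--                 suf[i] = (x, y)
--             want_even = xorall & matchbit != 0
--             premult = 1
--             for i in range(n):
--                 p = ps[i]
--                 if p & matchbit:
--                     x, y = suf[i + 1]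
--                     ans += (x if want_even else y) * premult % MOD
--                 premult = premult * ((p & mask) + 1) % MOD
--         if xorall == 0:
--             ans += 1
--         return ans % MOD
--     return (f(piles) - f([p - 1 for p in piles if p > 1])) % MOD
-- ===== Notes on version B (the rewrite author's own statement) =====
-- stated objective: alternative
-- what changed: For each bit, A reruns the whole suffix DP from scratch for every pile index; B makes one backward pass per bit precomputing all suffix transition pairs (the DP is linear in its state, so suffix results compose) and then a single forward pass that looks them up.
import Mathlib
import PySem

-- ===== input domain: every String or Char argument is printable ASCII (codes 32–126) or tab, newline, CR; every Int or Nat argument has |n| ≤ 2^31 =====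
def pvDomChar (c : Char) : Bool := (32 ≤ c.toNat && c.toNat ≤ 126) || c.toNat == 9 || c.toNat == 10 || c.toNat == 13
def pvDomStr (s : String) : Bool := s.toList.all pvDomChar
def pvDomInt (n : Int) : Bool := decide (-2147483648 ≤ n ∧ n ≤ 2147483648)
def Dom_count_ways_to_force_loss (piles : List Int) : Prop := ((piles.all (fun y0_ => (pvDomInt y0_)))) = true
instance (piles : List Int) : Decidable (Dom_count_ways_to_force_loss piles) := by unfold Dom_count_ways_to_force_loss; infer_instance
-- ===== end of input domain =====

-- Alternative algorithm: instead of A's per-index rerun of the suffix DP, B precomputes,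
-- per bit, all suffix transition pairs in one backward pass (the DP is linear in its
-- state, so suffix results compose) and combines them in a single forward pass.

def pvM : Int := 1000000007

-- ===== PORT A =====
-- body of A's innermost 'for pile in piles[i+1:]' loop
def pvStepA (matchbit : Int) (eo : Int × Int) (pile : Int) : Int × Int :=
  let neweven := (1 + PySem.Int.band pile (matchbit - 1)) * eo.1
  let newodd  := (1 + PySem.Int.band pile (matchbit - 1)) * eo.2
  let neweven := if PySem.Int.band pile matchbit ≠ 0 then neweven + matchbit * eo.2 else neweven
  let newodd  := if PySem.Int.band pile matchbit ≠ 0 then newodd + matchbit * eo.1 else newodd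
  (PySem.Int.mod neweven pvM, PySem.Int.mod newodd pvM)

-- '(even, odd) = (1, 0); for pile in suffix: …'
def pvInnerA (matchbit : Int) (suffix : List Int) : Int × Int :=
  suffix.foldl (pvStepA matchbit) (1, 0)

-- 'for (i, bigalt) in enumerate(piles)' with state (ans, premult); the structural
-- recursion passes 'rest', which IS piles[i+1:]
def pvLoopA (matchbit xorall : Int) : List Int → Int × Int → Int × Int
  | [], st => st
  | bigalt :: rest, st =>
    let eo := pvInnerA matchbit rest
    let ans := if PySem.Int.band bigalt matchbit ≠ 0 then
        st.1 + PySem.Int.mod ((if PySem.Int.band xorall matchbit ≠ 0 then eo.1 else eo.2) * st.2) pvM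
      else st.1
    pvLoopA matchbit xorall rest
      (ans, PySem.Int.mod (st.2 * (PySem.Int.band bigalt (matchbit - 1) + 1)) pvM)

-- numunrestrictedsolns
def pvNumA (piles : List Int) : Int :=
  match piles with
  | [] => 1
  | h :: t =>
    let xorall := t.foldl PySem.Int.bxor h
    let leftmost : Int := (PySem.Int.bitLength (t.foldl PySem.Int.bor h) : Int) - 1
    let rightmost : Int := max 0 ((PySem.Int.bitLength xorall : Int) - 1)
    let ans := (PySem.List.pyRange rightmost (leftmost + 1) 1).foldl
      (fun ans first1 => (pvLoopA ((1 : Int) <<< first1.toNat) xorall (h :: t) (ans, 1)).1) 0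
    let ans := if xorall = 0 then ans + 1 else ans
    PySem.Int.mod ans pvM

def count_ways_to_force_loss (piles : List Int) : Int :=
  PySem.Int.mod
    (pvNumA piles - pvNumA ((piles.filter (fun p => p > 1)).map (fun p => p - 1))) pvM

-- ===== PORT B =====
-- combine one pile's 2×2 symmetric transition into the suffix product (x, y)
def pvStepB (matchbit p : Int) (xy : Int × Int) : Int × Int :=
  let a := 1 + PySem.Int.band p (matchbit - 1)
  let b := if PySem.Int.band p matchbit ≠ 0 then matchbit else 0
  (PySem.Int.mod (xy.1 * a + xy.2 * b) pvM, PySem.Int.mod (xy.1 * b + xy.2 * a) pvM)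

-- the backward pass: 'for p in reversed(ps): … suf.append((x, y)); suf.reverse()'
def pvSufB (matchbit : Int) (ps : List Int) : List (Int × Int) :=
  ps.foldr (fun p acc =>
    match acc with
    | [] => []
    | xy :: _ => pvStepB matchbit p xy :: acc) [(1, 0)]

-- body of B's forward 'for p, (x, y) in zip(ps, suf[1:])' loop, state (ans, premult)
def pvBodyB (matchbit xorall : Int) (st : Int × Int) (pxy : Int × (Int × Int)) : Int × Int :=
  let ans := if PySem.Int.band pxy.1 matchbit ≠ 0 then
      st.1 + PySem.Int.mod ((if PySem.Int.band xorall matchbit ≠ 0 then pxy.2.1 else pxy.2.2) * st.2) pvM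
    else st.1
  (ans, PySem.Int.mod (st.2 * (PySem.Int.band pxy.1 (matchbit - 1) + 1)) pvM)

def pvNumB (ps : List Int) : Int :=
  match ps with
  | [] => 1
  | h :: t =>
    let xorall := t.foldl PySem.Int.bxor h
    let leftmost : Int := (PySem.Int.bitLength (t.foldl PySem.Int.bor h) : Int) - 1
    let rightmost : Int := max 0 ((PySem.Int.bitLength xorall : Int) - 1)
    let ans := (PySem.List.pyRange rightmost (leftmost + 1) 1).foldl
      (fun ans first1 =>
        let matchbit : Int := (1 : Int) <<< first1.toNat
        (((h :: t).zip ((pvSufB matchbit (h :: t)).tail)).foldl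
          (pvBodyB matchbit xorall) (ans, 1)).1) 0
    let ans := if xorall = 0 then ans + 1 else ans
    PySem.Int.mod ans pvM

def count_ways_to_force_loss_alt (piles : List Int) : Int :=
  PySem.Int.mod
    (pvNumB piles - pvNumB ((piles.filter (fun p => p > 1)).map (fun p => p - 1))) pvM

-- ===== PRECONDITION & SPEC =====
def Spec_count_ways_to_force_loss (piles : List Int) (out : Int) : Prop := out = count_ways_to_force_loss_alt piles
instance (piles : List Int) (out : Int) : Decidable (Spec_count_ways_to_force_loss piles out) := by unfold Spec_count_ways_to_force_loss; infer_instance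

-- ===== CLAIM (what is proved, stated in full; the proofs are below) =====
def Claim_equal_count_ways_to_force_loss : Prop := ∀ (piles : List Int), Dom_count_ways_to_force_loss piles → Spec_count_ways_to_force_loss piles (count_ways_to_force_loss piles)

-- ===== LEMMAS AND PROOFS =====

lemma pvM_pos : (0 : Int) < pvM := by norm_num [pvM]

lemma pvSelfMod (x : Int) : x % pvM ≡ x [ZMOD pvM] := Int.emod_emod_of_dvd x dvd_rfl

-- ((x%M)·e + (y%M)·o) % M = (x·e + y·o) % M
lemma pvMix (x y e o : Int) :
    ((x % pvM) * e + (y % pvM) * o) % pvM = (x * e + y * o) % pvM :=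
  Int.ModEq.add ((pvSelfMod x).mul_right e) ((pvSelfMod y).mul_right o)

lemma pvMix2 (x' y' a b e o : Int) :
    (x' * ((a * e + b * o) % pvM) + y' * ((a * o + b * e) % pvM)) % pvM
      = ((x' * a + y' * b) % pvM * e + (x' * b + y' * a) % pvM * o) % pvM := by
  have h1 : (x' * ((a * e + b * o) % pvM) + y' * ((a * o + b * e) % pvM))
      ≡ x' * (a * e + b * o) + y' * (a * o + b * e) [ZMOD pvM] :=
    Int.ModEq.add ((pvSelfMod _).mul_left x') ((pvSelfMod _).mul_left y')
  have h2 : ((x' * a + y' * b) % pvM * e + (x' * b + y' * a) % pvM * o)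
      ≡ (x' * a + y' * b) * e + (x' * b + y' * a) * o [ZMOD pvM] :=
    Int.ModEq.add ((pvSelfMod _).mul_right e) ((pvSelfMod _).mul_right o)
  have he : x' * (a * e + b * o) + y' * (a * o + b * e)
      = (x' * a + y' * b) * e + (x' * b + y' * a) * o := by ring
  exact h1.trans (he ▸ h2.symm)

-- pvStepA in (a, b)-coefficient form
lemma pvStepA_eq (m : Int) (eo : Int × Int) (p : Int) :
    pvStepA m eo p =
      (((1 + PySem.Int.band p (m - 1)) * eo.1 + (if PySem.Int.band p m ≠ 0 then m else 0) * eo.2) % pvM,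
       ((1 + PySem.Int.band p (m - 1)) * eo.2 + (if PySem.Int.band p m ≠ 0 then m else 0) * eo.1) % pvM) := by
  simp only [pvStepA, PySem.Int.mod_eq_emod_of_pos pvM_pos]
  split_ifs with h <;> rw [Prod.mk.injEq] <;> constructor <;> congr 1 <;> ring

lemma pvSufB_ne_nil (m : Int) (ps : List Int) : pvSufB m ps ≠ [] := by
  induction ps with
  | nil => simp [pvSufB]
  | cons p r ih =>
    simp only [pvSufB, List.foldr_cons] at *
    rcases hz : (r.foldr (fun p acc => match acc with
      | [] => []
      | xy :: _ => pvStepB m p xy :: acc) [((1 : Int), (0 : Int))]) with _ | ⟨z, zs⟩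
    · exact absurd hz ih
    · rw [hz]; simp

lemma pvSufB_cons (m p : Int) (ps : List Int) :
    pvSufB m (p :: ps) = pvStepB m p ((pvSufB m ps).headD (1, 0)) :: pvSufB m ps := by
  obtain ⟨z, zs, hz⟩ := List.exists_cons_of_ne_nil (pvSufB_ne_nil m ps)
  simp only [pvSufB, List.foldr_cons] at *
  rw [hz]
  simp

lemma pvStepB_eq (m p : Int) (xy : Int × Int) :
    pvStepB m p xy =
      ((xy.1 * (1 + PySem.Int.band p (m - 1)) + xy.2 * (if PySem.Int.band p m ≠ 0 then m else 0)) % pvM,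
       (xy.1 * (if PySem.Int.band p m ≠ 0 then m else 0) + xy.2 * (1 + PySem.Int.band p (m - 1))) % pvM) := by
  simp only [pvStepB, PySem.Int.mod_eq_emod_of_pos pvM_pos]

-- A's forward suffix DP, started at (e, o), is the bilinear form given by B's suffix pair
lemma pvFoldA_formula (m : Int) (ps : List Int) : ∀ p e o,
    List.foldl (pvStepA m) (e, o) (p :: ps) =
      ((((pvSufB m (p :: ps)).headD (1, 0)).1 * e + ((pvSufB m (p :: ps)).headD (1, 0)).2 * o) % pvM,
       (((pvSufB m (p :: ps)).headD (1, 0)).1 * o + ((pvSufB m (p :: ps)).headD (1, 0)).2 * e) % pvM) := by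
  induction ps with
  | nil =>
    intro p e o
    rw [pvSufB_cons, show pvSufB m ([] : List Int) = [(1, 0)] from rfl]
    rw [List.foldl_cons, List.foldl_nil, pvStepA_eq, pvStepB_eq, List.headD_cons]
    rw [Prod.mk.injEq]
    constructor <;> · rw [pvMix]; congr 1; simp
  | cons q r ih =>
    intro p e o
    rw [List.foldl_cons, pvStepA_eq, ih q, pvSufB_cons m p (q :: r), pvStepB_eq, List.headD_cons]
    rw [Prod.mk.injEq]
    exact ⟨pvMix2 .., pvMix2 ..⟩

lemma pvInnerA_eq_headD (m : Int) (l : List Int) :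
    pvInnerA m l = (pvSufB m l).headD (1, 0) := by
  cases l with
  | nil => simp [pvInnerA, pvSufB]
  | cons p r =>
    rw [pvInnerA, pvFoldA_formula m r p 1 0, pvSufB_cons, pvStepB_eq, List.headD_cons]
    rw [Prod.mk.injEq]
    constructor <;>
      · simp only [mul_one, mul_zero, zero_add, add_zero]
        exact Int.emod_emod_of_dvd _ dvd_rfl

lemma pvLoop_eq (m xa : Int) : ∀ (l : List Int) (st : Int × Int),
    pvLoopA m xa l st = (l.zip ((pvSufB m l).tail)).foldl (pvBodyB m xa) st := by
  intro l
  induction l with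
  | nil => intro st; simp [pvLoopA]
  | cons p r ih =>
    intro st
    rw [pvSufB_cons, List.tail_cons]
    obtain ⟨z, zs, hz⟩ := List.exists_cons_of_ne_nil (pvSufB_ne_nil m r)
    rw [hz, List.zip_cons_cons, List.foldl_cons, pvLoopA, ih]
    have hzz : (pvSufB m r).tail = zs := by rw [hz, List.tail_cons]
    rw [hzz]
    have hio : pvInnerA m r = z := by rw [pvInnerA_eq_headD, hz]; rfl
    simp only [pvBodyB, hio]

lemma pvNum_eq (ps : List Int) : pvNumA ps = pvNumB ps := by
  cases ps with
  | nil => rfl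
  | cons h t =>
    simp only [pvNumA, pvNumB]
    congr 1
    apply congrArg (fun z => if t.foldl PySem.Int.bxor h = 0 then z + 1 else z)
    apply PySem.List.foldl_congr_mem
    intro acc x _
    rw [pvLoop_eq]

lemma pv_main (ps : List Int) : count_ways_to_force_loss ps = count_ways_to_force_loss_alt ps := by
  rw [count_ways_to_force_loss, count_ways_to_force_loss_alt, pvNum_eq, pvNum_eq]

-- ===== VERDICT (by name: the statement is the Claim_ definition above) =====
theorem count_ways_to_force_loss_spec : Claim_equal_count_ways_to_force_loss := by
  intro piles _
  exact pv_main piles
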